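-- pv_equiv track=rewrite | github.com/TaliesinDS/STL-manager | scripts/lib/alias_rules.py | has_supporting_franchise_tokens
-- ===== SOURCE A (Python) =====
-- from typing import Dict, List, Optional
--
-- def has_supporting_franchise_tokens(
--     fr_key: str,
--     token_list: List[str],
--     fam: Dict[str, str],
--     f_tokens: Dict[str, Dict[str, set]],
--     exclude_token: Optional[str] = None,
-- ) -> bool:
--     """True if there is independent evidence of this franchise in tokens.
--
--     Evidence: any other token (not equal to exclude_token) is either a strong/weak
--     signal of the franchise or an alias that maps to this franchise and is not a stop token.
--     """
--     sigs = (f_tokens.get(fr_key, {}).get('strong', set()) or set()) | (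
--         f_tokens.get(fr_key, {}).get('weak', set()) or set()
--     )
--     for tt in token_list:
--         if exclude_token and tt == exclude_token:
--             continue
--         if tt in sigs:
--             return True
--         if tt in fam and fam[tt] == fr_key and tt not in (f_tokens.get(fr_key, {}).get('stop', set()) or set()):
--             return True
--     return False
-- ===== SOURCE B (Python) =====
-- from typing import Dict, List, Optional
--
-- def has_supporting_franchise_tokens(
--     fr_key: str,
--     token_list: List[str],
--     fam: Dict[str, str],
--     f_tokens: Dict[str, Dict[str, set]],
--     exclude_token: Optional[str] = None,
-- ) -> bool:
--     entry = f_tokens.get(fr_key, {})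
--     stop = entry.get('stop', set()) or set()
--     accept = (entry.get('strong', set()) or set()) | (entry.get('weak', set()) or set())
--     accept |= {t for t in fam if fam[t] == fr_key and t not in stop}
--     return any(not (exclude_token and tt == exclude_token) and tt in accept
--                for tt in token_list)
-- ===== Notes on version B (the rewrite author's own statement) =====
-- stated objective: alternative
-- what changed: B precomputes a single 'accept' set (strong ∪ weak ∪ {fam aliases mapping to fr_key and not in stop}) once and then does one any() membership scan over token_list, instead of A's per-token three-way test that re-evaluates the fam lookup and rebuilds the stop-set expression inside the loop.
import Mathlib
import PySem

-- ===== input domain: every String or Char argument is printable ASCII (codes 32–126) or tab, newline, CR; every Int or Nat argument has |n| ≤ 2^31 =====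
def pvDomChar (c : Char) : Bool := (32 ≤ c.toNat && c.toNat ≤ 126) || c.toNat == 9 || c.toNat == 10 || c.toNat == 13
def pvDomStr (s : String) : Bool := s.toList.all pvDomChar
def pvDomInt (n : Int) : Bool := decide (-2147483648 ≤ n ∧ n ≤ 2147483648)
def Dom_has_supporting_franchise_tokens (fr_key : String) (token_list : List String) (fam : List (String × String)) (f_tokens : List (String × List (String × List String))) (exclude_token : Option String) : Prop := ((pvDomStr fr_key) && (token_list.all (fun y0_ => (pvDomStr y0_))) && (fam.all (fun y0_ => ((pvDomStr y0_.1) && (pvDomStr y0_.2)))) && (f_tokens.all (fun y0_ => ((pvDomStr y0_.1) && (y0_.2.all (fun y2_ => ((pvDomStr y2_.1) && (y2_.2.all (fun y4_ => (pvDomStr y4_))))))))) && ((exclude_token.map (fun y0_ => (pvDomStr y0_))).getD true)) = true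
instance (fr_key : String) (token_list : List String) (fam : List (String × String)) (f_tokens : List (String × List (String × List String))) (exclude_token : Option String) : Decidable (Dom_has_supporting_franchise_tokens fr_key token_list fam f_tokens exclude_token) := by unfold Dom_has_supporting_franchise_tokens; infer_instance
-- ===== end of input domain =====

-- B precomputes one 'accept' set (strong ∪ weak ∪ fam-aliases-of-fr_key-minus-stop) and does a single
-- any() membership scan, instead of A's per-token three-way test; alternative decomposition, exact same result.


-- Python's '<set expr> or set()': an empty set is falsy and replaced by set() (identity on membership).
def pvOrSet (s : List String) : List String := if s.isEmpty then [] else s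

-- ===== PORT A =====
-- A's for-loop, as structural recursion; the stop-set expression is re-evaluated per token, as in A.
def pvLoopA (fr_key : String) (fam : List (String × String)) (f_tokens : List (String × List (String × List String))) (sigs : PySem.Set String) (exclude_token : Option String) : List String → Bool
  | [] => false
  | tt :: rest =>
    if (match exclude_token with | some e => decide (e ≠ "") && (tt == e) | none => false) then
      pvLoopA fr_key fam f_tokens sigs exclude_token rest
    else if PySem.Set.contains sigs tt then true
    else if (PySem.Dict.mk fam).contains tt
          && ((PySem.Dict.mk fam).getD tt "" == fr_key)
          && !((pvOrSet ((PySem.Dict.mk ((PySem.Dict.mk f_tokens).getD fr_key [])).getD "stop" [])).contains tt) then true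
    else pvLoopA fr_key fam f_tokens sigs exclude_token rest

def has_supporting_franchise_tokens (fr_key : String) (token_list : List String) (fam : List (String × String)) (f_tokens : List (String × List (String × List String))) (exclude_token : Option String) : Bool :=
  let sigs : PySem.Set String :=
    PySem.Set.union
      (PySem.Set.ofList (pvOrSet ((PySem.Dict.mk ((PySem.Dict.mk f_tokens).getD fr_key [])).getD "strong" [])))
      (pvOrSet ((PySem.Dict.mk ((PySem.Dict.mk f_tokens).getD fr_key [])).getD "weak" []))
  pvLoopA fr_key fam f_tokens sigs exclude_token token_list

-- ===== PORT B =====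
def has_supporting_franchise_tokens_alt (fr_key : String) (token_list : List String) (fam : List (String × String)) (f_tokens : List (String × List (String × List String))) (exclude_token : Option String) : Bool :=
  let entry := PySem.Dict.mk ((PySem.Dict.mk f_tokens).getD fr_key [])
  let stop := pvOrSet (entry.getD "stop" [])
  let accept : PySem.Set String :=
    PySem.Set.union
      (PySem.Set.union (PySem.Set.ofList (pvOrSet (entry.getD "strong" []))) (pvOrSet (entry.getD "weak" [])))
      ((PySem.Dict.mk fam).keys.filter
        (fun t => ((PySem.Dict.mk fam).get? t == some fr_key) && !(stop.contains t)))
  token_list.any (fun tt =>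
    !(match exclude_token with | some e => decide (e ≠ "") && (tt == e) | none => false)
      && PySem.Set.contains accept tt)

-- ===== PRECONDITION & SPEC =====
def Spec_has_supporting_franchise_tokens (fr_key : String) (token_list : List String) (fam : List (String × String)) (f_tokens : List (String × List (String × List String))) (exclude_token : Option String) (out : Bool) : Prop := out = has_supporting_franchise_tokens_alt fr_key token_list fam f_tokens exclude_token
instance (fr_key : String) (token_list : List String) (fam : List (String × String)) (f_tokens : List (String × List (String × List String))) (exclude_token : Option String) (out : Bool) : Decidable (Spec_has_supporting_franchise_tokens fr_key token_list fam f_tokens exclude_token out) := by unfold Spec_has_supporting_franchise_tokens; infer_instance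

-- ===== CLAIM (what is proved, stated in full; the proofs are below) =====
def Claim_equal_has_supporting_franchise_tokens : Prop := ∀ (fr_key : String) (token_list : List String) (fam : List (String × String)) (f_tokens : List (String × List (String × List String))) (exclude_token : Option String), Dom_has_supporting_franchise_tokens fr_key token_list fam f_tokens exclude_token → Spec_has_supporting_franchise_tokens fr_key token_list fam f_tokens exclude_token (has_supporting_franchise_tokens fr_key token_list fam f_tokens exclude_token)

-- ===== LEMMAS AND PROOFS =====

-- A's per-token alias test equals membership in B's filtered fam-key list.
theorem famcond_eq (fr_key : String) (fam : List (String × String)) (stop : List String) (tt : String) :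
    (tt ∈ ((PySem.Dict.mk fam).keys.filter
        (fun t => ((PySem.Dict.mk fam).get? t == some fr_key) && !(stop.contains t)))) ↔
    (((PySem.Dict.mk fam).contains tt
      && ((PySem.Dict.mk fam).getD tt "" == fr_key)
      && !(stop.contains tt)) = true) := by
  rw [List.mem_filter]
  cases h : (PySem.Dict.mk fam).get? tt with
  | none =>
    have hc : (PySem.Dict.mk fam).contains tt = false := by
      rw [PySem.Dict.contains_eq_isSome_get?, h]; rfl
    constructor
    · rintro ⟨-, hcond⟩
      simp at hcond
    · intro hcond
      rw [hc] at hcond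
      simp at hcond
  | some v =>
    have hc : (PySem.Dict.mk fam).contains tt = true := by
      rw [PySem.Dict.contains_eq_isSome_get?, h]; rfl
    have hk : tt ∈ (PySem.Dict.mk fam).keys := by
      by_contra hk
      rw [← PySem.Dict.get?_eq_none_iff_not_mem_keys] at hk
      simp [h] at hk
    have hd : (PySem.Dict.mk fam).getD tt "" = v := PySem.Dict.getD_of_get?_eq_some _ "" h
    constructor
    · rintro ⟨-, hcond⟩
      rw [hc, hd]
      simp only [Bool.true_and, Bool.and_eq_true, beq_iff_eq, Option.some.injEq] at hcond ⊢
      exact hcond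
    · intro hcond
      rw [hc, hd] at hcond
      refine ⟨hk, ?_⟩
      simp only [Bool.true_and, Bool.and_eq_true, beq_iff_eq, Option.some.injEq] at hcond ⊢
      exact hcond

-- membership in B's precomputed accept set = A's per-token disjunction
theorem accept_eq (fr_key : String) (fam : List (String × String)) (strong weak stop : List String) (tt : String) :
    PySem.Set.contains
      (PySem.Set.union (PySem.Set.union (PySem.Set.ofList strong) weak)
        ((PySem.Dict.mk fam).keys.filter
          (fun t => ((PySem.Dict.mk fam).get? t == some fr_key) && !(stop.contains t)))) tt
    = (PySem.Set.contains (PySem.Set.union (PySem.Set.ofList strong) weak) tt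
       || ((PySem.Dict.mk fam).contains tt
           && ((PySem.Dict.mk fam).getD tt "" == fr_key)
           && !(stop.contains tt))) := by
  rw [Bool.eq_iff_iff]
  simp only [PySem.Set.contains_iff, PySem.Set.mem_union, Bool.or_eq_true, famcond_eq]

theorem pv_ite_loop (skip c1 c2 r : Bool) :
    (if skip = true then r else if c1 = true then true else if c2 = true then true else r)
    = ((!skip && (c1 || c2)) || r) := by
  cases skip <;> cases c1 <;> cases c2 <;> cases r <;> rfl

theorem loopA_eq_any (fr_key : String) (fam : List (String × String)) (f_tokens : List (String × List (String × List String))) (sigs : PySem.Set String) (exclude_token : Option String) (ts : List String) :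
    pvLoopA fr_key fam f_tokens sigs exclude_token ts =
      ts.any (fun tt =>
        !(match exclude_token with | some e => decide (e ≠ "") && (tt == e) | none => false)
          && (PySem.Set.contains sigs tt
              || ((PySem.Dict.mk fam).contains tt
                  && ((PySem.Dict.mk fam).getD tt "" == fr_key)
                  && !((pvOrSet ((PySem.Dict.mk ((PySem.Dict.mk f_tokens).getD fr_key [])).getD "stop" [])).contains tt)))) := by
  induction ts with
  | nil => rfl
  | cons tt rest ih =>
    simp only [pvLoopA]
    rw [List.any_cons, ← ih]
    rw [pv_ite_loop]

-- ===== VERDICT (by name: the statement is the Claim_ definition above) =====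
theorem has_supporting_franchise_tokens_spec : Claim_equal_has_supporting_franchise_tokens := by
  intro fr_key token_list fam f_tokens exclude_token _hdom
  unfold Spec_has_supporting_franchise_tokens
  simp only [has_supporting_franchise_tokens, has_supporting_franchise_tokens_alt]
  rw [loopA_eq_any]
  congr 1
  funext tt
  congr 1
  exact (accept_eq fr_key fam _ _ _ tt).symm
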